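-- pv_equiv track=rewrite | github.com/introduction-to-python-2026/ps-5-ishay562-1 | string_utils.py | split_at_digit
-- ===== SOURCE A (Python) =====
-- def split_at_digit(formula):
--     formula_split = []
--     start = 0
--     for i in range(1, len(formula)):
--       if formula[i].isdigit():
--         formula_split.append(formula[start:i])
--         start = i
--     formula_split.append(formula[start:])
--     return formula_split
-- ===== SOURCE B (Python) =====
-- def split_at_digit(formula):
--     # Right-to-left character scan: build each piece char-by-char from the back,
--     # cutting whenever the character just added (at position >= 1) is a digit.
--     pieces = []
--     cur = ''
--     for ch in reversed(formula[1:]):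
--         cur = ch + cur
--         if ch.isdigit():
--             pieces.append(cur)
--             cur = ''
--     pieces.append(formula[:1] + cur)
--     pieces.reverse()
--     return pieces
-- ===== Notes on version B (the rewrite author's own statement) =====
-- stated objective: alternative
-- what changed: Replaces A's left-to-right index scan with slicing by a right-to-left character-level scan that builds each piece char-by-char in reverse (no indices, no slices), cutting after appending a digit, then reverses the piece list.
import Mathlib
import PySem

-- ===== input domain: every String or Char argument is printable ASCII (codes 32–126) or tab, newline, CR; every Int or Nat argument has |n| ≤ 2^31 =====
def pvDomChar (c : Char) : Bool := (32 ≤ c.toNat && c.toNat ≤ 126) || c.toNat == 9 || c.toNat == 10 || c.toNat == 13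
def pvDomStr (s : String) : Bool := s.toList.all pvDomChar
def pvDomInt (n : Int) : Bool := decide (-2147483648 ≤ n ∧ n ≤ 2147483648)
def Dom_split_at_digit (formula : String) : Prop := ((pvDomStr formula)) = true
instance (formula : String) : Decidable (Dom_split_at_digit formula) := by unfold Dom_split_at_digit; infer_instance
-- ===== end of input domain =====

-- B replaces A's left-to-right index scan with slicing by a right-to-left character scan
-- that builds each piece char-by-char in reverse (objective: alternative, same cost).

-- ===== PORT A =====
-- one pass, state (formula_split, start); i ∈ range(1, len) is always in bounds, so pyGetD is exact for formula[i]
def split_at_digit (formula : String) : List String :=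
  let r := (PySem.List.pyRange 1 (PySem.Str.len formula) 1).foldl
    (fun (st : List String × Int) i =>
      if PySem.Chars.isdigit (PySem.List.pyGetD formula.toList i ' ') then
        (st.1 ++ [String.ofList (PySem.List.slice formula.toList (some st.2) (some i))], i)
      else st) ([], 0)
  r.1 ++ [String.ofList (PySem.List.slice formula.toList (some r.2) none)]

-- ===== PORT B =====
-- right-to-left char loop over formula[1:]; cur is a piece being built (as chars, prepended),
-- pieces collected back-to-front and reversed at the end; formula[:1] prefixes the first piece
def split_at_digit_alt (formula : String) : List String :=
  let st := ((PySem.List.slice formula.toList (some 1) none).reverse).foldl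
    (fun (st : List String × List Char) ch =>
      let cur := ch :: st.2
      if PySem.Chars.isdigit ch then (st.1 ++ [String.ofList cur], [])
      else (st.1, cur)) ([], [])
  (st.1 ++ [String.ofList (PySem.List.slice formula.toList none (some 1) ++ st.2)]).reverse

-- ===== PRECONDITION & SPEC =====
def Spec_split_at_digit (formula : String) (out : List String) : Prop := out = split_at_digit_alt formula
instance (formula : String) (out : List String) : Decidable (Spec_split_at_digit formula out) := by unfold Spec_split_at_digit; infer_instance

-- ===== CLAIM (what is proved, stated in full; the proofs are below) =====
def Claim_equal_split_at_digit : Prop := ∀ (formula : String), Dom_split_at_digit formula → Spec_split_at_digit formula (split_at_digit formula)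

-- ===== LEMMAS AND PROOFS =====

-- reference splitter on char lists: pvF r = pieces of r with a cut before every digit of r
-- (a digit at position 0 of r yields a leading empty piece); always nonempty.
def pvConsHead (c : Char) : List (List Char) → List (List Char)
  | [] => [[c]]
  | p :: t => (c :: p) :: t

def pvF : List Char → List (List Char)
  | [] => [[]]
  | c :: r => if PySem.Chars.isdigit c then [] :: pvConsHead c (pvF r) else pvConsHead c (pvF r)

lemma pvF_ne_nil : ∀ r, pvF r ≠ [] := by
  intro r; cases r with
  | nil => simp [pvF]
  | cons c r => simp only [pvF]; split <;> (cases h : pvF r <;> simp [pvConsHead])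

lemma pvConsHead_eq (c : Char) (ps : List (List Char)) (h : ps ≠ []) :
    pvConsHead c ps = (c :: ps.headI) :: ps.tail := by
  cases ps with
  | nil => exact absurd rfl h
  | cons p t => simp [pvConsHead]

-- A-side accumulator form: pvG a r = pieces of a++r with cuts before digits of r, current piece a
def pvG (a : List Char) : List Char → List (List Char)
  | [] => [a]
  | c :: r => if PySem.Chars.isdigit c then a :: pvG [c] r else pvG (a ++ [c]) r

lemma pvG_eq_F : ∀ (r : List Char) (a : List Char),
    pvG a r = (a ++ (pvF r).headI) :: (pvF r).tail := by
  intro r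
  induction r with
  | nil => intro a; simp [pvG, pvF]
  | cons c r ih =>
      intro a
      simp only [pvG, pvF]
      rw [pvConsHead_eq c (pvF r) (pvF_ne_nil r)]
      split
      · rw [ih [c]]; simp
      · rw [ih (a ++ [c])]; simp

-- B's right-to-left loop (as a foldr over the un-reversed tail) computes pvF of the tail:
-- collected pieces = reversed map-ofList of (pvF r).tail, current piece = (pvF r).headI
lemma pv_B_inv : ∀ (r : List Char),
    (List.foldr (fun ch (st : List String × List Char) =>
        let cur := ch :: st.2
        if PySem.Chars.isdigit ch then (st.1 ++ [String.ofList cur], ([] : List Char))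
        else (st.1, cur)) ([], []) r)
      = (((pvF r).tail.map String.ofList).reverse, (pvF r).headI) := by
  intro r
  induction r with
  | nil => simp [pvF]
  | cons c r ih =>
      simp only [List.foldr_cons, ih, pvF]
      rw [pvConsHead_eq c (pvF r) (pvF_ne_nil r)]
      split <;> simp

-- A's indexed fold from position j with current start s equals pvG on the corresponding segments
lemma pv_A_inv : ∀ (k : Nat) (cs : List Char) (j s : Nat) (acc : List String),
    j + k = cs.length → s ≤ j →
    (let st := (PySem.List.pyRange (j : Int) (cs.length : Int) 1).foldl
        (fun (st : List String × Int) i =>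
          if PySem.Chars.isdigit (PySem.List.pyGetD cs i ' ') then
            (st.1 ++ [String.ofList (PySem.List.slice cs (some st.2) (some i))], i)
          else st) (acc, (s : Int));
      st.1 ++ [String.ofList (PySem.List.slice cs (some st.2) none)])
    = acc ++ (pvG ((cs.drop s).take (j - s)) (cs.drop j)).map String.ofList := by
  intro k
  induction k with
  | zero =>
      intro cs j s acc hjk hs
      have hj : j = cs.length := by omega
      subst hj
      rw [PySem.List.pyRange_one_eq_nil (le_refl _)]
      simp only [List.foldl_nil]
      rw [PySem.List.slice_from cs (by positivity)]
      have : (cs.drop s).take (cs.length - s) = cs.drop s := by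
        apply List.take_of_length_le; simp
      simp [pvG, this]
  | succ k ih =>
      intro cs j s acc hjk hs
      have hjlt : j < cs.length := by omega
      rw [PySem.List.pyRange_one_cons (by exact_mod_cast hjlt)]
      simp only [List.foldl_cons]
      rw [PySem.List.pyGetD_natCast]
      have hget : cs.getD j ' ' = cs[j] := List.getD_eq_getElem cs ' ' hjlt
      have hdrop : cs.drop j = cs[j] :: cs.drop (j + 1) :=
        List.drop_eq_getElem_cons hjlt
      have hcast : ((j : Int) + 1) = ((j + 1 : Nat) : Int) := by push_cast; ring
      by_cases hd : PySem.Chars.isdigit cs[j]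
      · rw [if_pos (by rw [hget]; exact hd)]
        rw [hcast, ih cs (j + 1) j (acc ++ [String.ofList (PySem.List.slice cs (some (s : Int)) (some (j : Int)))]) (by omega) (by omega)]
        rw [PySem.List.slice_toNat cs (by positivity) (by positivity)]
        simp only [Int.toNat_natCast]
        rw [hdrop]
        simp only [pvG, if_pos hd]
        rw [show j + 1 - j = 1 from by omega,
            show List.take 1 (cs[j] :: List.drop (j + 1) cs) = [cs[j]] from rfl]
        simp
      · rw [if_neg (by rw [hget]; exact hd)]
        rw [hcast, ih cs (j + 1) s acc (by omega) (by omega)]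
        rw [hdrop]
        simp only [pvG, if_neg hd]
        have h2 : (cs.drop s).take (j + 1 - s) = (cs.drop s).take (j - s) ++ [cs[j]] := by
          rw [show j + 1 - s = (j - s) + 1 from by omega]
          rw [List.take_add_one]
          congr 1
          have : (cs.drop s)[j - s]? = some cs[j] := by
            rw [List.getElem?_drop]
            rw [show s + (j - s) = j from by omega]
            exact List.getElem?_eq_getElem hjlt
          simp [this]
        rw [h2]

-- ===== VERDICT (by name: the statement is the Claim_ definition above) =====
theorem split_at_digit_spec : Claim_equal_split_at_digit := by
  intro formula _
  unfold Spec_split_at_digit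
  simp only [split_at_digit, split_at_digit_alt, PySem.Str.len_eq]
  generalize formula.toList = cs
  -- B side: formula[1:] = drop 1, formula[:1] = take 1, loop over reverse = foldr
  rw [PySem.List.slice_from cs (by norm_num : (0:Int) ≤ 1),
      PySem.List.slice_to cs (by norm_num : (0:Int) ≤ 1)]
  simp only [show ((1:Int).toNat = 1) from rfl]
  rw [List.foldl_reverse]
  have hB := pv_B_inv (cs.drop 1)
  rw [hB]
  -- A side: apply the invariant at j = min 1 (length), s = 0
  cases cs with
  | nil =>
      simp [PySem.List.pyRange_one_eq_nil, PySem.List.slice, pvF]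
  | cons c r =>
      have hA := pv_A_inv r.length (c :: r) 1 0 [] (by rw [List.length_cons]; omega) (by omega)
      simp only [List.nil_append, Nat.cast_zero, Nat.cast_one] at hA
      rw [hA]
      have h1 : ((c :: r).drop 0).take (1 - 0) = [c] := by simp
      have h2 : (c :: r).drop 1 = r := by simp
      rw [h1, h2, pvG_eq_F r [c]]
      simp
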